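-- pv_equiv track=rewrite | github.com/thanasisskotis/Group-Project | Algorithms/ex1.py | find_shortest_directed_cycle
-- ===== SOURCE A (Python) =====
-- import heapq
--
-- INF = int(1e9)
--
-- def find_shortest_directed_cycle(n, adj):
--     min_cycle = INF
--
--     for u in range(n):
--         dist = [INF] * n
--         dist[u] = 0
--         pq = [(0, u)]
--
--         while pq:
--             d, v = heapq.heappop(pq)
--             if d > dist[v]:
--                 continue
--             for to, w in adj[v]:
--                 if dist[to] > d + w:
--                     dist[to] = d + w
--                     heapq.heappush(pq, (dist[to], to))
--
--         for v in range(n):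
--             for to, w in adj[v]:
--                 if to == u and dist[v] != INF:
--                     min_cycle = min(min_cycle, dist[v] + w)
--
--     return -1 if min_cycle == INF else min_cycle
-- ===== SOURCE B (Python) =====
-- INF = int(1e9)
--
-- def find_shortest_directed_cycle(n, adj):
--     # All-pairs shortest distances by (functional) Floyd-Warshall, then one flat edge pass.
--     D = [[0 if i == j else INF for j in range(n)] for i in range(n)]
--     for v in range(n):
--         for to, w in adj[v]:
--             if w < D[v][to]:
--                 D[v][to] = w
--     for k in range(n):
--         D = [[min(D[i][j], D[i][k] + D[k][j]) for j in range(n)] for i in range(n)]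
--     best = INF
--     for v in range(n):
--         for to, w in adj[v]:
--             if D[to][v] != INF:
--                 best = min(best, w + D[to][v])
--     return -1 if best == INF else best
-- ===== Notes on version B (the rewrite author's own statement) =====
-- stated objective: alternative
-- what changed: Replaces n lazy-Dijkstra heap runs plus a per-source edge scan with a single all-pairs Floyd-Warshall distance table built once and one flat pass over the edges (min_cycle = min over edges (v,to,w) of w + D[to][v]).
-- outside the precondition, e.g. on find_shortest_directed_cycle(2, [[(1, -1)], [(0, -1)]]): A does not finish within the time limit, B returns -4; on find_shortest_directed_cycle(1, [[(-1, 3)]]): A returns -1, B returns 3; on find_shortest_directed_cycle(2, [[(1, -5)], []]): A returns -1, B returns -1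
import Mathlib
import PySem

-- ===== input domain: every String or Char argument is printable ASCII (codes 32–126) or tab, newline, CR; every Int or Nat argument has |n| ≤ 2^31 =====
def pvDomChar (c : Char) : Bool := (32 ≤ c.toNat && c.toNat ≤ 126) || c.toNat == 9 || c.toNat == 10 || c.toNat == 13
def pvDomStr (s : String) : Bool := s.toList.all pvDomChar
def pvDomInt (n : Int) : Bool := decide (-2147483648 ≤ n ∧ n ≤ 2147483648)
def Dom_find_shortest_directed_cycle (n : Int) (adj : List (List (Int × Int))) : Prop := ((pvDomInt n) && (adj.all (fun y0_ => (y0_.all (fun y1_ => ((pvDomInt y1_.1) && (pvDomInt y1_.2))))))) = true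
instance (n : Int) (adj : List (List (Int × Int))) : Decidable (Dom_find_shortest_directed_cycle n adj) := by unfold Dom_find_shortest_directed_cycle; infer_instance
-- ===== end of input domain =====

-- B replaces the n per-source lazy-Dijkstra heap runs by one Floyd-Warshall all-pairs table
-- plus a single flat edge pass (objective: alternative algorithm of similar cost).

-- ===== PORT A =====
-- Python INF = int(1e9)
def pvINF : Int := 1000000000

-- heapq is a standard-library module; it is ported as a lexicographically sorted-list
-- priority queue: heappush = ordered insert, heappop = head.  Observably identical to
-- heapq here: every pop yields the minimum (d, v) pair (ties are identical tuples).
def pvLexLt (a b : Int × Int) : Bool := a.1 < b.1 || (a.1 == b.1 && a.2 < b.2)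

def pvPush (x : Int × Int) : List (Int × Int) → List (Int × Int)
  | [] => [x]
  | y :: ys => if pvLexLt y x then y :: pvPush x ys else x :: y :: ys

-- inner loop 'for to, w in adj[v]': relax each edge, push on improvement.
-- dist[to] is indexed with .toNat/getD: exact on Pre_ inputs (0 ≤ to < n = |dist|).
def pvRelax (d : Int) : List (Int × Int) → List Int × List (Int × Int) → List Int × List (Int × Int)
  | [], s => s
  | (t, w) :: es, (dist, pq) =>
      if dist.getD t.toNat 0 > d + w then
        pvRelax d es (dist.set t.toNat (d + w), pvPush (d + w, t) pq)
      else pvRelax d es (dist, pq)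

-- 'while pq:' — fuel-totalised (the guard only makes the loop total: on Pre_ inputs the
-- fuel is proven never to run out, see pvM lemmas below).
def pvLoop (adj : List (List (Int × Int))) : Nat → List Int → List (Int × Int) → List Int
  | 0, dist, _ => dist
  | _ + 1, dist, [] => dist
  | fuel + 1, dist, (d, v) :: pq =>
      if d > dist.getD v.toNat 0 then pvLoop adj fuel dist pq
      else
        let s := pvRelax d (adj.getD v.toNat []) (dist, pq)
        pvLoop adj fuel s.1 s.2

def pvFuel (n : Nat) : Nat := 2 * n * 1000000001 + 2

-- one Dijkstra run from source u:  dist = [INF]*n; dist[u] = 0; pq = [(0,u)]; while pq: ...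
def pvDij (n : Nat) (adj : List (List (Int × Int))) (u : Nat) : List Int :=
  pvLoop adj (pvFuel n) ((List.replicate n pvINF).set u 0) [(0, (u : Int))]

-- 'for to, w in adj[v]: if to == u and dist[v] != INF: min_cycle = min(min_cycle, dist[v] + w)'
def pvScanRow (u : Int) (dv : Int) : Int → List (Int × Int) → Int
  | mc, [] => mc
  | mc, (t, w) :: es =>
      pvScanRow u dv (if t == u && !(dv == pvINF) then min mc (dv + w) else mc) es

def find_shortest_directed_cycle (n : Int) (adj : List (List (Int × Int))) : Int :=
  let nn := n.toNat
  let mc := (List.range nn).foldl (fun mc u =>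
    let dist := pvDij nn adj u
    (List.range nn).foldl (fun mc v => pvScanRow (↑u : Int) (dist.getD v 0) mc (adj.getD v [])) mc) pvINF
  if mc == pvINF then -1 else mc

-- ===== PORT B =====
def pvMGet (D : List (List Int)) (i j : Nat) : Int := (D.getD i []).getD j 0

-- D = [[0 if i == j else INF for j in range(n)] for i in range(n)]
def pvInit0 (n : Nat) : List (List Int) :=
  (List.range n).map (fun i => (List.range n).map (fun j => if i = j then 0 else pvINF))

-- 'for to, w in adj[v]: if w < D[v][to]: D[v][to] = w'
def pvAddEdges (v : Nat) (D : List (List Int)) (es : List (Int × Int)) : List (List Int) :=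
  es.foldl (fun D e =>
    if e.2 < pvMGet D v e.1.toNat then D.set v ((D.getD v []).set e.1.toNat e.2) else D) D

def pvInitD (n : Nat) (adj : List (List (Int × Int))) : List (List Int) :=
  (List.range n).foldl (fun D v => pvAddEdges v D (adj.getD v [])) (pvInit0 n)

-- D = [[min(D[i][j], D[i][k] + D[k][j]) for j in range(n)] for i in range(n)]
def pvFWRound (n : Nat) (D : List (List Int)) (k : Nat) : List (List Int) :=
  (List.range n).map (fun i => (List.range n).map (fun j =>
    min (pvMGet D i j) (pvMGet D i k + pvMGet D k j)))

def pvFW (n : Nat) (adj : List (List (Int × Int))) : List (List Int) :=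
  (List.range n).foldl (pvFWRound n) (pvInitD n adj)

def find_shortest_directed_cycle_alt (n : Int) (adj : List (List (Int × Int))) : Int :=
  let nn := n.toNat
  let D := pvFW nn adj
  let best := (List.range nn).foldl (fun b v => (adj.getD v []).foldl (fun b e =>
      if pvMGet D e.1.toNat v == pvINF then b else min b (e.2 + pvMGet D e.1.toNat v)) b) pvINF
  if best == pvINF then -1 else best

-- ===== PRECONDITION & SPEC =====
-- Pre_ restricts to the algorithm's natural domain of well-formed non-negative-weight
-- digraphs (at least n adjacency rows, edge targets in [0, n), weights ≥ 0; n ≤ 0 is fine);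
-- outside it A raises IndexError, diverges on negative cycles, or silently reinterprets
-- negative edge targets by Python index wraparound (and Dijkstra is unsound for negative
-- weights).
def Pre_find_shortest_directed_cycle (n : Int) (adj : List (List (Int × Int))) : Prop :=
  n.toNat ≤ adj.length ∧
    ∀ v, v < n.toNat → ∀ e ∈ adj.getD v [], 0 ≤ e.1 ∧ e.1 < ((n.toNat : Nat) : Int) ∧ 0 ≤ e.2

instance (n : Int) (adj : List (List (Int × Int))) : Decidable (Pre_find_shortest_directed_cycle n adj) := by
  unfold Pre_find_shortest_directed_cycle; infer_instance

def pvWitness_find_shortest_directed_cycle : Int × (List (List (Int × Int))) :=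
  (2, [[(1, 2)], [(0, 3)]])

def Spec_find_shortest_directed_cycle (n : Int) (adj : List (List (Int × Int))) (out : Int) : Prop := out = find_shortest_directed_cycle_alt n adj
instance (n : Int) (adj : List (List (Int × Int))) (out : Int) : Decidable (Spec_find_shortest_directed_cycle n adj out) := by unfold Spec_find_shortest_directed_cycle; infer_instance

-- ===== CLAIM (what is proved, stated in full; the proofs are below) =====
def Claim_equal_find_shortest_directed_cycle : Prop := ∀ (n : Int) (adj : List (List (Int × Int))), Dom_find_shortest_directed_cycle n adj → Pre_find_shortest_directed_cycle n adj → Spec_find_shortest_directed_cycle n adj (find_shortest_directed_cycle n adj)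

-- ===== LEMMAS AND PROOFS =====

-- well-formedness of the first n adjacency rows: every edge target is a vertex and
-- every weight is non-negative (this is the second half of Pre_, with n = n.toNat)
def pvGood (n : Nat) (adj : List (List (Int × Int))) : Prop :=
  n ≤ adj.length ∧ ∀ v, v < n → ∀ e ∈ adj.getD v [], 0 ≤ e.1 ∧ e.1 < (n : Int) ∧ 0 ≤ e.2

-- ---- the common mathematical yardstick: walks in the first n rows of adj ----
def pvEdge (adj : List (List (Int × Int))) (n v x : Nat) (w : Int) : Prop :=
  v < n ∧ ((x : Int), w) ∈ adj.getD v []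

inductive pvHW (adj : List (List (Int × Int))) (n : Nat) : Nat → Nat → Int → Prop
  | refl (v : Nat) : pvHW adj n v v 0
  | cons {v x y : Nat} {w c : Int} :
      pvEdge adj n v x w → pvHW adj n x y c → pvHW adj n v y (w + c)

-- walks with all intermediate vertices < k (endpoints unconstrained)
inductive pvHWB (adj : List (List (Int × Int))) (n k : Nat) : Nat → Nat → Int → Prop
  | refl (v : Nat) : pvHWB adj n k v v 0
  | single {v x : Nat} {w : Int} : pvEdge adj n v x w → pvHWB adj n k v x w
  | cons {v x y : Nat} {w c : Int} :
      pvEdge adj n v x w → x < k → pvHWB adj n k x y c → pvHWB adj n k v y (w + c)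

-- the characterisation both algorithms are proved to satisfy
def pvP (adj : List (List (Int × Int))) (n u v : Nat) (d : Int) : Prop :=
  d ≤ pvINF ∧ (∀ c, pvHW adj n u v c → d ≤ c) ∧ (d < pvINF → pvHW adj n u v d)

lemma pvP_unique {adj n u v} {d1 d2 : Int}
    (h1 : pvP adj n u v d1) (h2 : pvP adj n u v d2) : d1 = d2 := by
  obtain ⟨b1, l1, w1⟩ := h1
  obtain ⟨b2, l2, w2⟩ := h2
  rcases lt_trichotomy d1 d2 with h | h | h
  · have := l2 d1 (w1 (lt_of_lt_of_le h b2)); omega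
  · exact h
  · have := l1 d2 (w2 (lt_of_lt_of_le h b1)); omega

lemma pvEdge_good {adj n v x w} (hg : pvGood n adj) (he : pvEdge adj n v x w) :
    x < n ∧ 0 ≤ w := by
  obtain ⟨hv, hm⟩ := he
  have := (hg.2 v hv _ hm).2
  constructor
  · omega
  · exact this.2

lemma pvHW_trans {adj n u v y c1 c2} (h1 : pvHW adj n u v c1) (h2 : pvHW adj n v y c2) :
    pvHW adj n u y (c1 + c2) := by
  induction h1 with
  | refl => simpa using h2
  | cons he _ ih => have := pvHW.cons he (ih h2); rw [add_assoc]; exact this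

lemma pvHW_snoc {adj n u v x w c} (h : pvHW adj n u v c) (he : pvEdge adj n v x w) :
    pvHW adj n u x (c + w) := by
  have := pvHW_trans h (pvHW.cons he (pvHW.refl x))
  simpa using this

-- ======== part 1: the Dijkstra side satisfies pvP ========
-- list-indexing helpers
lemma pvGetD_set {α : Type} {l : List α} {i j : Nat} {x d : α} (hi : i < l.length) :
    (l.set i x).getD j d = if j = i then x else l.getD j d := by
  rcases Nat.lt_or_ge j l.length with hj | hj
  · by_cases h : j = i
    · subst h; simp [List.getD_eq_getElem?_getD, hj]
    · rw [if_neg h]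
      simp only [List.getD_eq_getElem?_getD, List.getElem?_set,
        if_neg (show ¬ (i = j) from fun hh => h hh.symm)]
  · have h : ¬ (j = i) := by omega
    rw [if_neg h, List.getD_eq_getElem?_getD, List.getD_eq_getElem?_getD,
      List.getElem?_eq_none (by simpa using hj), List.getElem?_eq_none (by simpa using hj)]

lemma pvMGet_mk (f : Nat → Nat → Int) {n i j : Nat} (hi : i < n) (hj : j < n) :
    pvMGet ((List.range n).map (fun i => (List.range n).map (f i))) i j = f i j := by
  simp [pvMGet, List.getD_eq_getElem?_getD, hi, hj]

def pvSum (n : Nat) (dist : List Int) : Nat :=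
  ∑ v ∈ Finset.range n, (dist.getD v 0).toNat

def pvM (n : Nat) (dist : List Int) (pq : List (Int × Int)) : Nat :=
  2 * pvSum n dist + pq.length

structure pvSInv (adj : List (List (Int × Int))) (n u : Nat)
    (dist : List Int) (pq : List (Int × Int)) : Prop where
  hub : ∀ v, v < n → 0 ≤ dist.getD v 0 ∧ dist.getD v 0 ≤ pvINF
  hlow : ∀ v, v < n → dist.getD v 0 = pvINF ∨ pvHW adj n u v (dist.getD v 0)
  hpq : ∀ p ∈ pq, ∃ x : Nat, p.2 = (x : Int) ∧ x < n ∧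
          dist.getD x 0 ≤ p.1 ∧ 0 ≤ p.1 ∧ pvHW adj n u x p.1
  hu : dist.getD u 0 ≤ 0

def pvRel (adj : List (List (Int × Int))) (dist : List Int) (v : Nat) : Prop :=
  ∀ e ∈ adj.getD v [], dist.getD e.1.toNat 0 ≤ dist.getD v 0 + e.2

def pvHR (adj : List (List (Int × Int))) (n : Nat) (dist : List Int) (pq : List (Int × Int)) : Prop :=
  ∀ v, v < n → (dist.getD v 0, (v : Int)) ∈ pq ∨ pvRel adj dist v

lemma pvPush_mem {x y : Int × Int} : ∀ {pq}, y ∈ pvPush x pq ↔ y = x ∨ y ∈ pq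
  | [] => by simp [pvPush]
  | z :: pq => by
      simp only [pvPush]
      split
      · simp only [List.mem_cons, pvPush_mem (pq := pq)]; tauto
      · simp only [List.mem_cons]

lemma pvPush_length {x : Int × Int} : ∀ {pq}, (pvPush x pq).length = pq.length + 1
  | [] => by simp [pvPush]
  | z :: pq => by
      simp only [pvPush]
      split
      · simp [pvPush_length (pq := pq)]
      · rfl

lemma pvSum_set {n t : Nat} {dist : List Int} {x : Int} (ht : t < n) (hlen : dist.length = n) :
    pvSum n (dist.set t x) + (dist.getD t 0).toNat = pvSum n dist + x.toNat := by
  unfold pvSum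
  have hfun : (fun v => ((dist.set t x).getD v 0).toNat) =
      Function.update (fun v => (dist.getD v 0).toNat) t x.toNat := by
    funext v
    rw [Function.update_apply, pvGetD_set (by omega)]
    split <;> rfl
  rw [hfun, Finset.sum_update_of_mem (Finset.mem_range.2 ht),
    Finset.sum_eq_sum_diff_singleton_add (Finset.mem_range.2 ht)
      (fun v => (dist.getD v 0).toNat)]
  omega

-- the relax-fold lemma: one pass of 'for to, w in adj[v]'
lemma pvRelax_spec {adj : List (List (Int × Int))} {n u x : Nat} {d : Int}
    (hg : pvGood n adj) (hx : x < n) (hd0 : 0 ≤ d) (hdw : pvHW adj n u x d) :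
    ∀ (es : List (Int × Int)) (dist : List Int) (pq : List (Int × Int)),
    dist.length = n →
    (∀ e ∈ es, e ∈ adj.getD x []) →
    pvSInv adj n u dist pq →
    (pvRelax d es (dist, pq)).1.length = n ∧
    pvSInv adj n u (pvRelax d es (dist, pq)).1 (pvRelax d es (dist, pq)).2 ∧
    (∀ y, (pvRelax d es (dist, pq)).1.getD y 0 ≤ dist.getD y 0) ∧
    (∀ y, y < n →
      ((pvRelax d es (dist, pq)).1.getD y 0, (y : Int)) ∈ (pvRelax d es (dist, pq)).2 ∨
      (pvRelax d es (dist, pq)).1.getD y 0 = dist.getD y 0) ∧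
    (∀ p ∈ pq, p ∈ (pvRelax d es (dist, pq)).2) ∧
    (∀ e ∈ es, (pvRelax d es (dist, pq)).1.getD e.1.toNat 0 ≤ d + e.2) ∧
    pvM n (pvRelax d es (dist, pq)).1 (pvRelax d es (dist, pq)).2 ≤ pvM n dist pq := by
  intro es
  induction es with
  | nil =>
      intro dist pq hlen _ hinv
      exact ⟨hlen, hinv, fun y => le_refl _, fun y _ => Or.inr rfl,
        fun p hp => hp, by simp, le_refl _⟩
  | cons e es ih =>
      intro dist pq hlen hsub hinv
      obtain ⟨t, w⟩ := e
      have hem : ((t, w) : Int × Int) ∈ adj.getD x [] := hsub _ (List.mem_cons_self)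
      have hew := hg.2 x hx _ hem
      have htn : t.toNat < n := by simp at hew; omega
      have htc : ((t.toNat : Int)) = t := by simp at hew; omega
      simp only [pvRelax]
      by_cases hcond : dist.getD t.toNat 0 > d + w
      · rw [if_pos hcond]
        set dist1 := dist.set t.toNat (d + w) with hdist1
        set pq1 := pvPush (d + w, t) pq with hpq1
        have hlen1 : dist1.length = n := by rw [hdist1, List.length_set]; exact hlen
        have hget1 : ∀ y, dist1.getD y 0 = if y = t.toNat then d + w else dist.getD y 0 := by
          intro y
          rw [hdist1, pvGetD_set (by omega)]
        have hdw2 : 0 ≤ d + w := by simp at hew; omega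
        have hHWt : pvHW adj n u t.toNat (d + w) := by
          refine pvHW_snoc hdw ⟨hx, ?_⟩
          rw [htc]; exact hem
        have hinv1 : pvSInv adj n u dist1 pq1 := by
          refine ⟨?_, ?_, ?_, ?_⟩
          · intro v hv
            rw [hget1]
            split
            · constructor
              · exact hdw2
              · have := (hinv.hub t.toNat htn).2; omega
            · exact hinv.hub v hv
          · intro v hv
            rw [hget1]
            split
            · rename_i hh; subst hh; exact Or.inr hHWt
            · exact hinv.hlow v hv
          · intro p hp
            rw [hpq1, pvPush_mem] at hp
            rcases hp with hp | hp
            · subst hp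
              refine ⟨t.toNat, by simpa using htc.symm, htn, ?_, hdw2, hHWt⟩
              rw [hget1, if_pos rfl]
            · obtain ⟨y, hy1, hy2, hy3, hy4, hy5⟩ := hinv.hpq p hp
              refine ⟨y, hy1, hy2, ?_, hy4, hy5⟩
              rw [hget1]
              split
              · rename_i hh
                rw [hh] at hy3
                omega
              · exact hy3
          · rw [hget1]
            split
            · rename_i hh
              have h1 := hinv.hu
              rw [hh] at h1
              omega
            · exact hinv.hu
        obtain ⟨hlenR, hinvR, hmonoR, hchR, hkeepR, hrelR, hmR⟩ :=
          ih dist1 pq1 hlen1 (fun e' he' => hsub e' (List.mem_cons_of_mem _ he')) hinv1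
        have hmono1 : ∀ y, dist1.getD y 0 ≤ dist.getD y 0 := by
          intro y
          rw [hget1]
          split
          · rename_i hh; subst hh; omega
          · exact le_refl _
        refine ⟨hlenR, hinvR, fun y => le_trans (hmonoR y) (hmono1 y), ?_, ?_, ?_, ?_⟩
        · intro y hy
          rcases hchR y hy with h | h
          · exact Or.inl h
          · by_cases hyt : y = t.toNat
            · subst hyt
              refine Or.inl ?_
              have hmem : ((d + w, t) : Int × Int) ∈ pq1 := by
                rw [hpq1, pvPush_mem]; exact Or.inl rfl
              have := hkeepR _ hmem
              rw [h, hget1, if_pos rfl, htc]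
              exact this
            · rw [h, hget1, if_neg hyt]
              exact Or.inr rfl
        · intro p hp
          exact hkeepR p (by rw [hpq1, pvPush_mem]; exact Or.inr hp)
        · intro e' he'
          rcases List.mem_cons.1 he' with h | h
          · subst h
            refine le_trans (hmonoR _) ?_
            rw [hget1, if_pos rfl]
          · exact hrelR e' h
        · refine le_trans hmR ?_
          have hsum := pvSum_set (t := t.toNat) (x := d + w) htn hlen
          rw [← hdist1] at hsum
          have hlenq : pq1.length = pq.length + 1 := by rw [hpq1, pvPush_length]
          have h1 : 0 ≤ dist.getD t.toNat 0 := (hinv.hub t.toNat htn).1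
          unfold pvM at hmR ⊢
          rw [hlenq]
          have : (d + w).toNat + 1 ≤ (dist.getD t.toNat 0).toNat := by omega
          omega
      · rw [if_neg hcond]
        obtain ⟨hlenR, hinvR, hmonoR, hchR, hkeepR, hrelR, hmR⟩ :=
          ih dist pq hlen (fun e' he' => hsub e' (List.mem_cons_of_mem _ he')) hinv
        refine ⟨hlenR, hinvR, hmonoR, hchR, hkeepR, ?_, hmR⟩
        intro e' he'
        rcases List.mem_cons.1 he' with h | h
        · subst h
          exact le_trans (hmonoR _) (by show dist.getD t.toNat 0 ≤ d + w; omega)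
        · exact hrelR e' h

lemma pvLoop_spec {adj : List (List (Int × Int))} {n u : Nat} (hg : pvGood n adj) (_hu : u < n) :
    ∀ (fuel : Nat) (dist : List Int) (pq : List (Int × Int)),
    dist.length = n →
    pvSInv adj n u dist pq →
    pvHR adj n dist pq →
    pvM n dist pq < fuel →
    pvSInv adj n u (pvLoop adj fuel dist pq) [] ∧
    (∀ v, v < n → pvRel adj (pvLoop adj fuel dist pq) v) := by
  intro fuel
  induction fuel with
  | zero => intro dist pq _ _ _ hm; omega
  | succ fuel ih =>
      intro dist pq hlen hinv hhr hm
      match pq with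
      | [] =>
          refine ⟨⟨hinv.hub, hinv.hlow, by simp, hinv.hu⟩, ?_⟩
          intro v hv
          rcases hhr v hv with h | h
          · simp at h
          · exact h
      | (d, v) :: pq =>
          obtain ⟨xx, hx1, hx2, hx3, hx4, hx5⟩ := hinv.hpq (d, v) (List.mem_cons_self)
          simp only at hx1
          have hvx : v.toNat = xx := by rw [hx1]; omega
          simp only [pvLoop]
          by_cases hcond : d > dist.getD v.toNat 0
          · rw [if_pos hcond]
            have hinv' : pvSInv adj n u dist pq :=
              ⟨hinv.hub, hinv.hlow, fun p hp => hinv.hpq p (List.mem_cons_of_mem _ hp), hinv.hu⟩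
            have hhr' : pvHR adj n dist pq := by
              intro y hy
              rcases hhr y hy with h | h
              · rcases List.mem_cons.1 h with h | h
                · exfalso
                  have h1 : dist.getD y 0 = d := congrArg Prod.fst h
                  have h2 : ((y : Int)) = v := congrArg Prod.snd h
                  have : y = v.toNat := by omega
                  rw [← this] at hcond
                  omega
                · exact Or.inl h
              · exact Or.inr h
            refine ih dist pq hlen hinv' hhr' ?_
            have : pvM n dist ((d, v) :: pq) = pvM n dist pq + 1 := by
              unfold pvM; simp only [List.length_cons]; omega
            omega
          · rw [if_neg hcond]
            rw [hvx] at hcond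
            have hx4' : (0 : Int) ≤ d := hx4
            have hx5' : pvHW adj n u xx d := hx5
            have hdx : d = dist.getD xx 0 := by
              have hx3' : dist.getD xx 0 ≤ d := hx3
              omega
            have hinv' : pvSInv adj n u dist pq :=
              ⟨hinv.hub, hinv.hlow, fun p hp => hinv.hpq p (List.mem_cons_of_mem _ hp), hinv.hu⟩
            obtain ⟨hlenR, hinvR, hmonoR, hchR, hkeepR, hrelR, hmR⟩ :=
              pvRelax_spec hg hx2 hx4' hx5' (adj.getD v.toNat []) dist pq hlen
                (by rw [hvx]; exact fun e h => h) hinv'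
            have hhrR : pvHR adj n (pvRelax d (adj.getD v.toNat []) (dist, pq)).1
                (pvRelax d (adj.getD v.toNat []) (dist, pq)).2 := by
              intro y hy
              rcases hchR y hy with h | h
              · exact Or.inl h
              · rcases hhr y hy with hh | hh
                · rcases List.mem_cons.1 hh with hh | hh
                  · -- the popped entry was this vertex's witness: y = xx and dist[y] = d
                    have h1 : dist.getD y 0 = d := congrArg Prod.fst hh
                    have h2 : ((y : Int)) = v := congrArg Prod.snd hh
                    have hyx : y = xx := by omega
                    refine Or.inr ?_
                    intro e he
                    have hres : (pvRelax d (adj.getD v.toNat []) (dist, pq)).1.getD y 0 = d := by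
                      rw [h, h1]
                    rw [hres]
                    exact hrelR e (show e ∈ adj.getD v.toNat [] by rw [hvx, ← hyx]; exact he)
                  · refine Or.inl ?_
                    have := hkeepR _ hh
                    rw [h]
                    exact this
                · refine Or.inr ?_
                  intro e he
                  refine le_trans (hmonoR _) (le_trans (hh e he) ?_)
                  rw [h]
            refine ih _ _ hlenR hinvR hhrR ?_
            have : pvM n dist ((d, v) :: pq) = pvM n dist pq + 1 := by
              unfold pvM; simp only [List.length_cons]; omega
            omega

lemma pvRel_walk {adj : List (List (Int × Int))} {n : Nat} {dist : List Int}
    (hg : pvGood n adj) (hrel : ∀ v, v < n → pvRel adj dist v) :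
    ∀ {x y : Nat} {c : Int}, pvHW adj n x y c → dist.getD y 0 ≤ dist.getD x 0 + c := by
  intro x y c h
  induction h with
  | refl => omega
  | @cons v z y w c he hw ih =>
      have hz := pvEdge_good hg he
      have h1 : dist.getD z 0 ≤ dist.getD v 0 + w := by
        have := hrel v he.1 ((z : Int), w) he.2
        simpa using this
      omega

lemma pvDij_P {adj : List (List (Int × Int))} {n u : Nat} (hg : pvGood n adj) (hu : u < n) :
    ∀ v, v < n → pvP adj n u v ((pvDij n adj u).getD v 0) := by
  have hget0 : ∀ v, v < n →
      ((List.replicate n pvINF).set u 0).getD v 0 = if v = u then 0 else pvINF := by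
    intro v hv
    rw [pvGetD_set (by simpa using hu)]
    split
    · rfl
    · rw [List.getD_eq_getElem?_getD, List.getElem?_replicate, if_pos hv]
      rfl
  have hlen0 : ((List.replicate n pvINF).set u 0).length = n := by simp
  have hinv0 : pvSInv adj n u ((List.replicate n pvINF).set u 0) [(0, (u : Int))] := by
    refine ⟨?_, ?_, ?_, ?_⟩
    · intro v hv
      rw [hget0 v hv]
      split <;> norm_num [pvINF]
    · intro v hv
      rw [hget0 v hv]
      split
      · rename_i hh; subst hh; exact Or.inr (pvHW.refl v)
      · exact Or.inl rfl
    · intro p hp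
      simp only [List.mem_singleton] at hp
      subst hp
      exact ⟨u, rfl, hu, by rw [hget0 u hu, if_pos rfl], le_refl _, pvHW.refl u⟩
    · rw [hget0 u hu, if_pos rfl]
  have hhr0 : pvHR adj n ((List.replicate n pvINF).set u 0) [(0, (u : Int))] := by
    intro v hv
    by_cases hvu : v = u
    · subst hvu
      rw [hget0 v hv, if_pos rfl]
      exact Or.inl (List.mem_singleton.2 rfl)
    · refine Or.inr ?_
      intro e he
      have hew := hg.2 v hv e he
      have htn : e.1.toNat < n := by omega
      have h1 := (hinv0.hub e.1.toNat htn).2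
      rw [hget0 v hv, if_neg hvu]
      omega
  have hmm : pvM n ((List.replicate n pvINF).set u 0) [(0, (u : Int))] < pvFuel n := by
    unfold pvM pvFuel
    have hsb : pvSum n ((List.replicate n pvINF).set u 0) ≤ n * 1000000000 := by
      unfold pvSum
      calc ∑ v ∈ Finset.range n, (((List.replicate n pvINF).set u 0).getD v 0).toNat
          ≤ ∑ _v ∈ Finset.range n, 1000000000 := by
            refine Finset.sum_le_sum ?_
            intro v hv
            rw [hget0 v (Finset.mem_range.1 hv)]
            split <;> simp [pvINF]
        _ = n * 1000000000 := by simp [Finset.sum_const]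
    simp only [List.length_singleton]
    omega
  obtain ⟨hinvF, hrelF⟩ :=
    pvLoop_spec hg hu (pvFuel n) _ _ hlen0 hinv0 hhr0 hmm
  intro v hv
  refine ⟨(hinvF.hub v hv).2, ?_, ?_⟩
  · intro c hc
    have := pvRel_walk hg hrelF hc
    have := hinvF.hu
    unfold pvDij
    omega
  · intro hlt
    rcases hinvF.hlow v hv with h | h
    · unfold pvDij at hlt; omega
    · exact h

-- ======== part 2: the Floyd-Warshall side satisfies pvP ========
lemma pvHWB_nonneg {adj n k u v c} (hg : pvGood n adj) (h : pvHWB adj n k u v c) : 0 ≤ c := by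
  induction h with
  | refl => omega
  | single he => exact (pvEdge_good hg he).2
  | cons he _ _ ih => have := (pvEdge_good hg he).2; omega

lemma pvHW_toHWB {adj n u v c} (hg : pvGood n adj) (h : pvHW adj n u v c) :
    pvHWB adj n n u v c := by
  induction h with
  | refl => exact pvHWB.refl _
  | cons he _ ih => exact pvHWB.cons he (pvEdge_good hg he).1 ih

lemma pvHWB_split_aux {adj n} (hg : pvGood n adj) :
    ∀ {k' u v c}, pvHWB adj n k' u v c → ∀ {k}, k' = k + 1 →
    pvHWB adj n k u v c ∨
    ∃ c1 c2, c1 + c2 ≤ c ∧ pvHWB adj n k u k c1 ∧ pvHWB adj n k k v c2 := by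
  intro k' u v c h
  induction h with
  | refl => intro k hk; exact Or.inl (pvHWB.refl _)
  | single he => intro k hk; exact Or.inl (pvHWB.single he)
  | @cons v x y w c he hx hw ih =>
      intro k hk
      subst hk
      rcases ih rfl with hb | ⟨c1, c2, hle, hp, hs⟩
      · by_cases hxk : x < k
        · exact Or.inl (pvHWB.cons he hxk hb)
        · have hxe : x = k := by omega
          subst hxe
          exact Or.inr ⟨w, c, by omega, pvHWB.single he, hb⟩
      · by_cases hxk : x < k
        · exact Or.inr ⟨w + c1, c2, by omega, pvHWB.cons he hxk hp, hs⟩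
        · have hxe : x = k := by omega
          subst hxe
          have hc1 : 0 ≤ c1 := pvHWB_nonneg hg hp
          exact Or.inr ⟨w, c2, by omega, pvHWB.single he, hs⟩

lemma pvHWB_split {adj n k u v c} (hg : pvGood n adj) (h : pvHWB adj n (k + 1) u v c) :
    pvHWB adj n k u v c ∨
    ∃ c1 c2, c1 + c2 ≤ c ∧ pvHWB adj n k u k c1 ∧ pvHWB adj n k k v c2 :=
  pvHWB_split_aux hg h rfl

def pvFWInv (adj : List (List (Int × Int))) (n k : Nat) (D : List (List Int)) : Prop :=
  ∀ i j, i < n → j < n →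
    (0 ≤ pvMGet D i j ∧ pvMGet D i j ≤ pvINF) ∧
    (pvMGet D i j < pvINF → pvHW adj n i j (pvMGet D i j)) ∧
    (∀ c, pvHWB adj n k i j c → pvMGet D i j ≤ c)

def pvShape (n : Nat) (D : List (List Int)) : Prop :=
  D.length = n ∧ ∀ r ∈ D, r.length = n

lemma pvMGet_set_row {D : List (List Int)} {v : Nat} {r : List Int} (hv : v < D.length)
    (i j : Nat) : pvMGet (D.set v r) i j = if i = v then r.getD j 0 else pvMGet D i j := by
  unfold pvMGet
  rw [pvGetD_set hv]
  split <;> rfl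

-- the invariant carried through the edge-initialisation folds
def pvQ (adj : List (List (Int × Int))) (n : Nat) (D : List (List Int)) : Prop :=
  ∀ i j, i < n → j < n →
    (0 ≤ pvMGet D i j ∧ pvMGet D i j ≤ pvINF) ∧
    (pvMGet D i j < pvINF → pvHW adj n i j (pvMGet D i j)) ∧
    (i = j → pvMGet D i j ≤ 0)

lemma pvAddEdges_spec {adj : List (List (Int × Int))} {n v : Nat}
    (hg : pvGood n adj) (hv : v < n) :
    ∀ (es : List (Int × Int)) (D : List (List Int)),
    (∀ e ∈ es, e ∈ adj.getD v []) →
    pvShape n D → pvQ adj n D →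
    pvShape n (pvAddEdges v D es) ∧ pvQ adj n (pvAddEdges v D es) ∧
    (∀ i j, pvMGet (pvAddEdges v D es) i j ≤ pvMGet D i j) ∧
    (∀ e ∈ es, pvMGet (pvAddEdges v D es) v e.1.toNat ≤ e.2) := by
  intro es
  induction es with
  | nil => intro D _ hs hq; exact ⟨hs, hq, fun i j => le_refl _, by simp⟩
  | cons e es ih =>
      intro D hsub hs hq
      have hem : e ∈ adj.getD v [] := hsub e (List.mem_cons_self)
      have hew := hg.2 v hv e hem
      have hto : e.1.toNat < n := by omega
      simp only [pvAddEdges, List.foldl_cons]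
      by_cases hcond : e.2 < pvMGet D v e.1.toNat
      · rw [if_pos hcond]
        set D1 := D.set v ((D.getD v []).set e.1.toNat e.2) with hD1
        have hvD : v < D.length := by rw [hs.1]; exact hv
        have hrow : (D.getD v []).length = n := by
          have := hs.2 (D.getD v [])
          rcases Nat.lt_or_ge v D.length with h | h
          · exact this (by rw [List.getD_eq_getElem?_getD, List.getElem?_eq_getElem h]; exact List.getElem_mem h)
          · omega
        have hget : ∀ i j, pvMGet D1 i j =
            if i = v ∧ j = e.1.toNat then e.2 else pvMGet D i j := by
          intro i j
          rw [hD1, pvMGet_set_row hvD]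
          by_cases hiv : i = v
          · subst hiv
            rw [pvGetD_set (by rw [hrow]; exact hto)]
            by_cases hje : j = e.1.toNat <;> simp [hje, pvMGet]
          · simp [hiv]
        have hs1 : pvShape n D1 := by
          refine ⟨by rw [hD1, List.length_set]; exact hs.1, ?_⟩
          intro r hr
          rcases List.mem_or_eq_of_mem_set hr with h | h
          · exact hs.2 r h
          · subst h; rw [List.length_set]; exact hrow
        have hmono1 : ∀ i j, pvMGet D1 i j ≤ pvMGet D i j := by
          intro i j
          rw [hget]
          split
          · rename_i hh
            obtain ⟨h1, h2⟩ := hh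
            subst h1; subst h2
            omega
          · exact le_refl _
        have hq1 : pvQ adj n D1 := by
          intro i j hi hj
          rw [hget i j]
          split
          · rename_i hh
            obtain ⟨hiv, hje⟩ := hh
            rw [hiv, hje]
            refine ⟨⟨hew.2.2, le_trans (le_of_lt hcond) (hq v e.1.toNat hv hto).1.2⟩, ?_, ?_⟩
            · intro _
              have hmem' : ((e.1.toNat : Int), e.2) ∈ adj.getD v [] := by
                have : (e.1.toNat : Int) = e.1 := by omega
                rw [this]; simpa using hem
              simpa using pvHW.cons ⟨hv, hmem'⟩ (pvHW.refl e.1.toNat)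
            · intro hd
              exfalso
              have := (hq v e.1.toNat hv hto).2.2 hd
              omega
          · exact hq i j hi hj
        obtain ⟨hsr, hqr, hmr, hcr⟩ := ih D1 (fun e' he' => hsub e' (List.mem_cons_of_mem _ he')) hs1 hq1
        refine ⟨hsr, hqr, fun i j => le_trans (hmr i j) (hmono1 i j), ?_⟩
        intro e' he'
        rcases List.mem_cons.1 he' with h | h
        · subst h
          refine le_trans (hmr v e'.1.toNat) ?_
          rw [hget]; simp
        · exact hcr e' h
      · rw [if_neg hcond]
        obtain ⟨hsr, hqr, hmr, hcr⟩ := ih D (fun e' he' => hsub e' (List.mem_cons_of_mem _ he')) hs hq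
        refine ⟨hsr, hqr, hmr, ?_⟩
        intro e' he'
        rcases List.mem_cons.1 he' with h | h
        · subst h; exact le_trans (hmr v e'.1.toNat) (by omega)
        · exact hcr e' h

lemma pvInit0_spec {adj : List (List (Int × Int))} {n : Nat} :
    pvShape n (pvInit0 n) ∧ pvQ adj n (pvInit0 n) := by
  constructor
  · constructor
    · simp [pvInit0]
    · intro r hr
      simp only [pvInit0, List.mem_map] at hr
      obtain ⟨i, _, rfl⟩ := hr
      simp
  · intro i j hi hj
    unfold pvInit0
    rw [pvMGet_mk _ hi hj]
    by_cases h : i = j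
    · subst h
      simp only [if_pos]
      exact ⟨⟨le_refl _, by norm_num [pvINF]⟩, fun _ => pvHW.refl i, fun _ => le_refl _⟩
    · simp only [if_neg h]
      exact ⟨⟨by norm_num [pvINF], le_refl _⟩, fun hh => absurd hh (lt_irrefl _), fun hh => absurd hh h⟩

lemma pvInitD_spec {adj : List (List (Int × Int))} {n : Nat} (hg : pvGood n adj) :
    pvShape n (pvInitD n adj) ∧ pvQ adj n (pvInitD n adj) ∧
    (∀ v, v < n → ∀ e ∈ adj.getD v [], pvMGet (pvInitD n adj) v e.1.toNat ≤ e.2) := by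
  have main : ∀ (l : List Nat) (D : List (List Int)), (∀ v ∈ l, v < n) →
      pvShape n D → pvQ adj n D →
      pvShape n (l.foldl (fun D v => pvAddEdges v D (adj.getD v [])) D) ∧
      pvQ adj n (l.foldl (fun D v => pvAddEdges v D (adj.getD v [])) D) ∧
      (∀ i j, pvMGet (l.foldl (fun D v => pvAddEdges v D (adj.getD v [])) D) i j ≤ pvMGet D i j) ∧
      (∀ v ∈ l, ∀ e ∈ adj.getD v [],
        pvMGet (l.foldl (fun D v => pvAddEdges v D (adj.getD v [])) D) v e.1.toNat ≤ e.2) := by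
    intro l
    induction l with
    | nil => intro D _ hs hq; exact ⟨hs, hq, fun i j => le_refl _, by simp⟩
    | cons v l ih =>
        intro D hmem hs hq
        have hv : v < n := hmem v (List.mem_cons_self)
        obtain ⟨hs1, hq1, hm1, hc1⟩ :=
          pvAddEdges_spec hg hv (adj.getD v []) D (fun _ h => h) hs hq
        simp only [List.foldl_cons]
        obtain ⟨hsr, hqr, hmr, hcr⟩ :=
          ih (pvAddEdges v D (adj.getD v [])) (fun x hx => hmem x (List.mem_cons_of_mem _ hx)) hs1 hq1
        refine ⟨hsr, hqr, fun i j => le_trans (hmr i j) (hm1 i j), ?_⟩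
        intro x hx e he
        rcases List.mem_cons.1 hx with h | h
        · subst h; exact le_trans (hmr x e.1.toNat) (hc1 e he)
        · exact hcr x h e he
  have h0 := pvInit0_spec (adj := adj) (n := n)
  obtain ⟨hs, hq, _, hc⟩ := main (List.range n) (pvInit0 n) (fun v hv => List.mem_range.1 hv) h0.1 h0.2
  exact ⟨hs, hq, fun v hv e he => hc v (List.mem_range.2 hv) e he⟩

lemma pvInitD_inv {adj : List (List (Int × Int))} {n : Nat} (hg : pvGood n adj) :
    pvFWInv adj n 0 (pvInitD n adj) := by
  obtain ⟨hs, hq, hc⟩ := pvInitD_spec hg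
  intro i j hi hj
  refine ⟨(hq i j hi hj).1, (hq i j hi hj).2.1, ?_⟩
  intro c hwb
  cases hwb with
  | refl => exact (hq i i hi hi).2.2 rfl
  | single he =>
      have := hc i hi ((j : Int), c) he.2
      simpa using this
  | cons _ hk _ => omega

lemma pvFWRound_inv {adj : List (List (Int × Int))} {n k : Nat} {D : List (List Int)}
    (hg : pvGood n adj) (hk : k < n) (h : pvFWInv adj n k D) :
    pvFWInv adj n (k + 1) (pvFWRound n D k) := by
  intro i j hi hj
  have hget : pvMGet (pvFWRound n D k) i j =
      min (pvMGet D i j) (pvMGet D i k + pvMGet D k j) := pvMGet_mk _ hi hj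
  obtain ⟨hbij, hcij, hdij⟩ := h i j hi hj
  obtain ⟨hbik, hcik, hdik⟩ := h i k hi hk
  obtain ⟨hbkj, hckj, hdkj⟩ := h k j hk hj
  rw [hget]
  refine ⟨⟨le_min hbij.1 (by omega), le_trans (min_le_left _ _) hbij.2⟩, ?_, ?_⟩
  · intro hlt
    rcases le_total (pvMGet D i j) (pvMGet D i k + pvMGet D k j) with hle | hle
    · rw [min_eq_left hle] at hlt
      rw [min_eq_left hle]
      exact hcij hlt
    · rw [min_eq_right hle] at hlt
      rw [min_eq_right hle]
      have h1 : pvMGet D i k < pvINF := by omega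
      have h2 : pvMGet D k j < pvINF := by omega
      exact pvHW_trans (hcik h1) (hckj h2)
  · intro c hwb
    rcases pvHWB_split hg hwb with hb | ⟨c1, c2, hle, hp, hs⟩
    · exact le_trans (min_le_left _ _) (hdij c hb)
    · refine le_trans (min_le_right _ _) ?_
      have := hdik c1 hp
      have := hdkj c2 hs
      omega

lemma pvFW_P {adj : List (List (Int × Int))} {n : Nat} (hg : pvGood n adj) :
    ∀ u v, u < n → v < n → pvP adj n u v (pvMGet (pvFW n adj) u v) := by
  have main : ∀ k, k ≤ n →
      pvFWInv adj n k ((List.range k).foldl (pvFWRound n) (pvInitD n adj)) := by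
    intro k
    induction k with
    | zero => intro _; simpa using pvInitD_inv hg
    | succ k ih =>
        intro hk
        rw [List.range_succ, List.foldl_append]
        exact pvFWRound_inv hg (by omega) (ih (by omega))
  intro u v hu hv
  have hinv := main n (le_refl n) u v hu hv
  refine ⟨hinv.1.2, ?_, hinv.2.1⟩
  intro c hw
  exact hinv.2.2 c (pvHW_toHWB hg hw)

-- the two distance tables coincide
lemma pvDij_eq_FW {adj : List (List (Int × Int))} {n : Nat} (hg : pvGood n adj) :
    ∀ u v, u < n → v < n → (pvDij n adj u).getD v 0 = pvMGet (pvFW n adj) u v := by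
  intro u v hu hv
  exact pvP_unique (pvDij_P hg hu v hv) (pvFW_P hg u v hu hv)

-- ======== part 3: the two final scans compute the same minimum ========
lemma pvFoldlMinFlat {α : Type} (f : α → List Int) :
    ∀ (l : List α) (mc : Int),
    l.foldl (fun mc x => (f x).foldl min mc) mc = (l.flatMap f).foldl min mc := by
  intro l
  induction l with
  | nil => intro mc; rfl
  | cons a l ih =>
      intro mc
      rw [List.foldl_cons, List.flatMap_cons, List.foldl_append]
      exact ih _

lemma pvFoldlMinIf {α : Type} (p : α → Bool) (g : α → Int) :
    ∀ (l : List α) (mc : Int),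
    l.foldl (fun mc x => if p x then min mc (g x) else mc) mc =
      (l.filterMap (fun x => if p x then some (g x) else none)).foldl min mc := by
  intro l
  induction l with
  | nil => intro mc; rfl
  | cons a l ih =>
      intro mc
      by_cases h : p a = true
      · simp only [List.foldl_cons, List.filterMap_cons, h, if_true, List.foldl_cons]
        exact ih _
      · simp only [List.foldl_cons, List.filterMap_cons, h, Bool.false_eq_true, if_false]
        exact ih _

lemma pvFoldlMinIf' {α : Type} (q : α → Bool) (g : α → Int) :
    ∀ (l : List α) (mc : Int),
    l.foldl (fun mc x => if q x then mc else min mc (g x)) mc =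
      (l.filterMap (fun x => if !(q x) then some (g x) else none)).foldl min mc := by
  intro l mc
  rw [← pvFoldlMinIf (fun x => !(q x)) g l mc]
  refine PySem.List.foldl_congr_mem _ _ _ _ ?_
  intro acc x _
  by_cases h : q x = true
  · simp [h]
  · simp [h]

lemma pvScanRow_foldl (u dv : Int) :
    ∀ (es : List (Int × Int)) (mc : Int),
    pvScanRow u dv mc es =
      es.foldl (fun mc e => if e.1 == u && !(dv == pvINF) then min mc (dv + e.2) else mc) mc := by
  intro es
  induction es with
  | nil => intro mc; rfl
  | cons e es ih =>
      intro mc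
      obtain ⟨t, w⟩ := e
      rw [pvScanRow, List.foldl_cons]
      exact ih _

lemma pvFlatMapSplit {β γ : Type} :
    ∀ (l : List β) (g h : β → List γ),
    (l.flatMap fun b => g b ++ h b).Perm (l.flatMap g ++ l.flatMap h) := by
  intro l
  induction l with
  | nil => intro g h; simp
  | cons b l ih =>
      intro g h
      simp only [List.flatMap_cons]
      have p1 : ((g b ++ h b) ++ l.flatMap fun b => g b ++ h b).Perm
          (g b ++ (h b ++ (l.flatMap g ++ l.flatMap h))) := by
        rw [List.append_assoc]
        exact List.Perm.append_left _ (List.Perm.append_left _ (ih g h))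
      have p2 : (g b ++ (h b ++ (l.flatMap g ++ l.flatMap h))).Perm
          (g b ++ (l.flatMap g ++ (h b ++ l.flatMap h))) :=
        List.Perm.append_left _ (List.perm_append_comm_assoc _ _ _)
      have p3 := p1.trans p2
      rwa [← List.append_assoc] at p3

lemma pvFlatMapComm {α β γ : Type} :
    ∀ (l1 : List α) (l2 : List β) (f : α → β → List γ),
    (l1.flatMap fun a => l2.flatMap fun b => f a b).Perm
      (l2.flatMap fun b => l1.flatMap fun a => f a b) := by
  intro l1
  induction l1 with
  | nil => intro l2 f; simp
  | cons a l1 ih =>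
      intro l2 f
      rw [List.flatMap_cons]
      have h2 : (l2.flatMap fun b => (a :: l1).flatMap fun a => f a b) =
          l2.flatMap (fun b => f a b ++ l1.flatMap (fun a => f a b)) := by
        refine List.flatMap_congr ?_
        intro b _
        rw [List.flatMap_cons]
      rw [h2]
      refine List.Perm.trans ?_ (pvFlatMapSplit l2 _ _).symm
      exact List.Perm.append (List.Perm.refl _) (ih l2 f)

lemma pvRangePick (t : Nat) (c : Nat → Bool) (val : Nat → Int) :
    ∀ m, t < m →
    ((List.range m).flatMap (fun (u : Nat) => if (u == t) && c u then [val u] else [])) =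
      (if c t then [val t] else []) := by
  intro m
  induction m with
  | zero => intro h; omega
  | succ m ih =>
      intro ht
      rw [List.range_succ, List.flatMap_append]
      by_cases h : t < m
      · rw [ih h]
        have hb : (m == t) = false := by simp; omega
        have h2 : ([m].flatMap (fun (u : Nat) => if (u == t) && c u then [val u] else [])) = [] := by
          simp only [List.flatMap_cons, List.flatMap_nil, List.append_nil, hb, Bool.false_and,
            Bool.false_eq_true, if_false]
        rw [h2, List.append_nil]
      · have ht2 : t = m := by omega
        subst ht2
        have h1 : ((List.range t).flatMap (fun (u : Nat) => if (u == t) && c u then [val u] else [])) = [] := by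
          rw [List.flatMap_eq_nil_iff]
          intro u hu
          have hb : (u == t) = false := by
            have := List.mem_range.1 hu
            simp
            omega
          simp only [hb, Bool.false_and, Bool.false_eq_true, if_false]
        rw [h1, List.nil_append]
        simp only [List.flatMap_cons, List.flatMap_nil, List.append_nil, beq_self_eq_true,
          Bool.true_and]

theorem find_shortest_directed_cycle_spec : Claim_equal_find_shortest_directed_cycle := by
  unfold Claim_equal_find_shortest_directed_cycle
  intro n adj _ hpre
  unfold Spec_find_shortest_directed_cycle
  have hg : pvGood n.toNat adj := hpre
  have hmc :
      (List.range n.toNat).foldl (fun mc (u : Nat) =>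
        (List.range n.toNat).foldl (fun mc v =>
          pvScanRow (↑u : Int) ((pvDij n.toNat adj u).getD v 0) mc (adj.getD v [])) mc) pvINF
      = (List.range n.toNat).foldl (fun b v => (adj.getD v []).foldl (fun b e =>
          if pvMGet (pvFW n.toNat adj) e.1.toNat v == pvINF then b
          else min b (e.2 + pvMGet (pvFW n.toNat adj) e.1.toNat v)) b) pvINF := by
    -- A's scan as a min-fold over an explicit candidate list
    have hA : (List.range n.toNat).foldl (fun mc (u : Nat) =>
        (List.range n.toNat).foldl (fun mc v =>
          pvScanRow (↑u : Int) ((pvDij n.toNat adj u).getD v 0) mc (adj.getD v [])) mc) pvINF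
        = ((List.range n.toNat).flatMap (fun (u : Nat) => (List.range n.toNat).flatMap (fun v =>
            (adj.getD v []).filterMap (fun e =>
              if e.1 == (↑u : Int) && !(pvMGet (pvFW n.toNat adj) u v == pvINF) then
                some (pvMGet (pvFW n.toNat adj) u v + e.2) else none)))).foldl min pvINF := by
      rw [← pvFoldlMinFlat]
      refine PySem.List.foldl_congr_mem _ _ _ _ ?_
      intro mc u hu
      have hu' : u < n.toNat := List.mem_range.1 hu
      rw [← pvFoldlMinFlat]
      refine PySem.List.foldl_congr_mem _ _ _ _ ?_
      intro mc v hv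
      have hv' : v < n.toNat := List.mem_range.1 hv
      rw [pvScanRow_foldl, pvFoldlMinIf
        (fun (e : Int × Int) => e.1 == (↑u : Int) && !((pvDij n.toNat adj u).getD v 0 == pvINF))
        (fun e => (pvDij n.toNat adj u).getD v 0 + e.2),
        pvDij_eq_FW hg u v hu' hv']
    -- B's scan as a min-fold over an explicit candidate list
    have hB : (List.range n.toNat).foldl (fun b v => (adj.getD v []).foldl (fun b e =>
          if pvMGet (pvFW n.toNat adj) e.1.toNat v == pvINF then b
          else min b (e.2 + pvMGet (pvFW n.toNat adj) e.1.toNat v)) b) pvINF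
        = ((List.range n.toNat).flatMap (fun v => (adj.getD v []).filterMap (fun e =>
            if !(pvMGet (pvFW n.toNat adj) e.1.toNat v == pvINF) then
              some (e.2 + pvMGet (pvFW n.toNat adj) e.1.toNat v) else none))).foldl min pvINF := by
      rw [← pvFoldlMinFlat]
      refine PySem.List.foldl_congr_mem _ _ _ _ ?_
      intro b v hv
      rw [pvFoldlMinIf'
        (fun (e : Int × Int) => pvMGet (pvFW n.toNat adj) e.1.toNat v == pvINF)
        (fun e => e.2 + pvMGet (pvFW n.toNat adj) e.1.toNat v)]
    rw [hA, hB]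
    -- the two candidate lists are permutations of each other
    refine List.Perm.foldl_op_eq ?_
    refine List.Perm.trans (pvFlatMapComm _ _ _) ?_
    refine List.Perm.flatMap_left _ ?_
    intro v hv
    have hv' : v < n.toNat := List.mem_range.1 hv
    -- per row v: swap u with the edge list, then collapse the u-range
    have hstep1 : ((List.range n.toNat).flatMap (fun (u : Nat) =>
        (adj.getD v []).filterMap (fun e =>
          if e.1 == (↑u : Int) && !(pvMGet (pvFW n.toNat adj) u v == pvINF) then
            some (pvMGet (pvFW n.toNat adj) u v + e.2) else none)))
        = ((List.range n.toNat).flatMap (fun (u : Nat) => (adj.getD v []).flatMap (fun e =>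
            (if e.1 == (↑u : Int) && !(pvMGet (pvFW n.toNat adj) u v == pvINF) then
              some (pvMGet (pvFW n.toNat adj) u v + e.2) else none).toList))) := by
      refine List.flatMap_congr ?_
      intro u _
      rw [List.filterMap_eq_flatMap_toList]
    rw [hstep1]
    refine List.Perm.trans (pvFlatMapComm _ _ _) ?_
    have hstep2 : ((adj.getD v []).flatMap (fun e => (List.range n.toNat).flatMap (fun (u : Nat) =>
        (if e.1 == (↑u : Int) && !(pvMGet (pvFW n.toNat adj) u v == pvINF) then
          some (pvMGet (pvFW n.toNat adj) u v + e.2) else none).toList)))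
        = ((adj.getD v []).filterMap (fun e =>
            if !(pvMGet (pvFW n.toNat adj) e.1.toNat v == pvINF) then
              some (e.2 + pvMGet (pvFW n.toNat adj) e.1.toNat v) else none)) := by
      rw [List.filterMap_eq_flatMap_toList]
      refine List.flatMap_congr ?_
      intro e he
      have hew := hg.2 v hv' e he
      have htn : e.1.toNat < n.toNat := by omega
      have htc : ((e.1.toNat : Int)) = e.1 := by omega
      have hfun : (fun (u : Nat) => (if e.1 == (↑u : Int) && !(pvMGet (pvFW n.toNat adj) u v == pvINF) then
            some (pvMGet (pvFW n.toNat adj) u v + e.2) else none).toList)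
          = (fun (u : Nat) => if (u == e.1.toNat) && !(pvMGet (pvFW n.toNat adj) u v == pvINF) then
              [pvMGet (pvFW n.toNat adj) u v + e.2] else []) := by
        funext u
        have hbeq : (e.1 == (↑u : Int)) = (u == e.1.toNat) := by
          rw [Bool.eq_iff_iff]
          simp only [beq_iff_eq]
          omega
        rw [hbeq]
        by_cases hc : ((u == e.1.toNat) && !(pvMGet (pvFW n.toNat adj) u v == pvINF)) = true
        · rw [if_pos hc, if_pos hc]; rfl
        · rw [if_neg hc, if_neg hc]; rfl
      rw [hfun, pvRangePick e.1.toNat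
        (fun (u : Nat) => !(pvMGet (pvFW n.toNat adj) u v == pvINF))
        (fun (u : Nat) => pvMGet (pvFW n.toNat adj) u v + e.2) n.toNat htn]
      rw [Int.add_comm]
      by_cases hc : (!(pvMGet (pvFW n.toNat adj) e.1.toNat v == pvINF)) = true
      · rw [if_pos hc, if_pos hc]; rfl
      · rw [if_neg hc, if_neg hc]; rfl
    rw [hstep2]
  simp only [find_shortest_directed_cycle, find_shortest_directed_cycle_alt]
  rw [hmc]
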